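-- pv_equiv track=rewrite | github.com/gavin-stork/Blackjack | blackjack.py | possible_totals
-- ===== SOURCE A (Python) =====
-- def get_card_value(card):
--     """Returns the numeric value of a single card."""
--     value, suit = card
--     match value:
--         case 'Jack' | 'Queen' | 'King':
--             return 10
--         case 'Ace':
--             return 11
--         case _:
--             return int(value)
--
-- def possible_totals(hand):
--     """Returns all possible totals for a hand, accounting for Aces as 1 or 11."""
--     totals = [0]
--     for card in hand:
--         value = get_card_value(card)
--         if card[0] == 'Ace':
--             new_totals = []
--             for total in totals:
--                 new_totals.append(total + 1)
--                 new_totals.append(total + 11)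
--             totals = new_totals
--         else:
--             totals = [total + value for total in totals]
--     return totals
-- ===== SOURCE B (Python) =====
-- def get_card_value(card):
--     """Returns the numeric value of a single card."""
--     value, suit = card
--     match value:
--         case 'Jack' | 'Queen' | 'King':
--             return 10
--         case 'Ace':
--             return 11
--         case _:
--             return int(value)
--
-- def possible_totals(hand):
--     """All possible hand totals: fixed base sum of non-Ace cards, then a
--     combinatorial expansion over the number of Aces (each 1 or 11)."""
--     base = sum(get_card_value(c) for c in hand if c[0] != 'Ace')
--     aces = sum(1 for c in hand if c[0] == 'Ace')
--     combos = [0]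
--     for _ in range(aces):
--         combos = [t + x for t in combos for x in (1, 11)]
--     return [base + t for t in combos]
-- ===== Notes on version B (the rewrite author's own statement) =====
-- stated objective: alternative
-- what changed: A threads one fused loop over the cards, rewriting the whole totals list at every card; B aggregates a fixed base sum over non-Ace cards and an Ace count in separate passes, then expands only the Ace choices combinatorially and adds the base once at the end.
import Mathlib
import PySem

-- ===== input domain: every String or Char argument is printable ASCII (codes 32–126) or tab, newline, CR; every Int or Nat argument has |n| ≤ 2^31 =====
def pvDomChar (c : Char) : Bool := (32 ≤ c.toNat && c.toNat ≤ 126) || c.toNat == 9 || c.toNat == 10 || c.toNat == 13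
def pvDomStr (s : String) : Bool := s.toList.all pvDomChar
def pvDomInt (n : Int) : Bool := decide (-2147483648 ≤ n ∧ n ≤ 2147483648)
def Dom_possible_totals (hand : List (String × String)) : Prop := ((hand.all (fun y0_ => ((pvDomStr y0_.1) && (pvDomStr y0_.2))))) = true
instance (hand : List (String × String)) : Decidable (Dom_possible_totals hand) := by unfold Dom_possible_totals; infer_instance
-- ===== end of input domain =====

-- B replaces A's fused per-card rewrite of the totals list by separate passes: a fixed
-- base sum over non-Ace cards, an Ace count, and a combinatorial expansion of the Aces.

-- ===== PORT A =====
-- int(value) raises ValueError on non-numeric values; Pre_ excludes those hands, so getD 0 is never read.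
def get_card_value (card : String × String) : Int :=
  if card.1 = "Jack" ∨ card.1 = "Queen" ∨ card.1 = "King" then 10
  else if card.1 = "Ace" then 11
  else (PySem.Int.ofStr? card.1).getD 0

def possible_totals (hand : List (String × String)) : List Int :=
  hand.foldl (fun totals card =>
    let value := get_card_value card
    if card.1 = "Ace" then
      totals.foldl (fun nt t => nt ++ [t + 1] ++ [t + 11]) []
    else
      totals.map (fun t => t + value)) [0]

-- ===== PORT B =====
def possible_totals_alt (hand : List (String × String)) : List Int :=
  let base := (hand.filter (fun c => c.1 ≠ "Ace")).foldl (fun s c => s + get_card_value c) 0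
  let aces := (hand.filter (fun c => c.1 = "Ace")).length
  let combos := (List.range aces).foldl (fun cs _ => cs.flatMap (fun t => [t + 1, t + 11])) [0]
  combos.map (fun t => base + t)

-- ===== PRECONDITION & SPEC =====
-- Pre_ excludes exactly the hands on which A (and B alike) raises ValueError in int(value).
def Pre_possible_totals (hand : List (String × String)) : Prop :=
  ∀ c ∈ hand, c.1 = "Jack" ∨ c.1 = "Queen" ∨ c.1 = "King" ∨ c.1 = "Ace" ∨
    (PySem.Int.ofStr? c.1).isSome = true
instance (hand : List (String × String)) : Decidable (Pre_possible_totals hand) := by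
  unfold Pre_possible_totals; infer_instance

def pvWitness_possible_totals : (List (String × String)) :=
  [("Ace", "Spades"), ("10", "Hearts"), ("King", "Clubs")]

def Spec_possible_totals (hand : List (String × String)) (out : List Int) : Prop := out = possible_totals_alt hand
instance (hand : List (String × String)) (out : List Int) : Decidable (Spec_possible_totals hand out) := by unfold Spec_possible_totals; infer_instance

-- ===== CLAIM (what is proved, stated in full; the proofs are below) =====
def Claim_equal_possible_totals : Prop := ∀ (hand : List (String × String)), Dom_possible_totals hand → Pre_possible_totals hand → Spec_possible_totals hand (possible_totals hand)

-- ===== LEMMAS AND PROOFS =====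

-- the Ace expansion step
def aceExp (t : Int) : List Int := [t + 1, t + 11]

lemma aceExp_def : aceExp = fun t => [t + 1, t + 11] := rfl

-- A's loop body, named for the proofs (definitionally the lambda in possible_totals)
def stepA (totals : List Int) (card : String × String) : List Int :=
  let value := get_card_value card
  if card.1 = "Ace" then
    totals.foldl (fun nt t => nt ++ [t + 1] ++ [t + 11]) []
  else
    totals.map (fun t => t + value)

-- B's combo table for a Aces
def combosOf (a : Nat) : List Int :=
  (List.range a).foldl (fun cs _ => cs.flatMap (fun t => [t + 1, t + 11])) [0]

lemma possible_totals_eq_foldl (hand : List (String × String)) :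
    possible_totals hand = hand.foldl stepA [0] := rfl

lemma alt_eq (hand : List (String × String)) :
    possible_totals_alt hand =
      (combosOf ((hand.filter (fun c => c.1 = "Ace")).length)).map (fun t =>
        (hand.filter (fun c => c.1 ≠ "Ace")).foldl (fun s c => s + get_card_value c) 0 + t) := rfl

lemma foldl_aceExp (ts acc : List Int) :
    ts.foldl (fun nt t => nt ++ [t + 1] ++ [t + 11]) acc = acc ++ ts.flatMap aceExp := by
  induction ts generalizing acc with
  | nil => simp
  | cons x xs ih => simp [aceExp_def, List.flatMap_def]

lemma combosOf_succ (a : Nat) : combosOf (a + 1) = (combosOf a).flatMap aceExp := by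
  simp only [combosOf, List.range_succ, List.foldl_append, List.foldl_cons, List.foldl_nil]
  rfl

-- expansion commutes with a constant shift
lemma flatMap_aceExp_shift (l : List Int) (c : Int) :
    (l.map (fun t => t + c)).flatMap aceExp = ((l.flatMap aceExp).map (fun t => t + c)) := by
  induction l with
  | nil => simp
  | cons x xs ih =>
      simp only [List.map_cons, List.flatMap_cons, ih, List.map_append]
      congr 1
      simp only [aceExp, List.map_cons, List.map_nil]
      rw [show x + c + 1 = x + 1 + c by ring, show x + c + 11 = x + 11 + c by ring]

-- the combo table can equally be expanded at the head (first Ace varies slowest)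
lemma combosOf_succ_head (a : Nat) :
    combosOf (a + 1) = (combosOf a).map (fun t => t + 1) ++ (combosOf a).map (fun t => t + 11) := by
  induction a with
  | zero => simp [combosOf, List.range_succ]
  | succ a ih =>
      conv_lhs => rw [combosOf_succ (a + 1), ih]
      rw [List.flatMap_append, flatMap_aceExp_shift, flatMap_aceExp_shift, ← combosOf_succ]

-- main invariant: A's loop from any accumulator is the per-element shifted combo table
lemma main_inv (hand : List (String × String)) (ts : List Int) :
    hand.foldl stepA ts
      =
    ts.flatMap (fun d =>
      (combosOf ((hand.filter (fun c => c.1 = "Ace")).length)).map (fun t =>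
        d + (hand.filter (fun c => c.1 ≠ "Ace")).foldl (fun s c => s + get_card_value c) 0 + t)) := by
  induction hand generalizing ts with
  | nil =>
      simp [combosOf]
  | cons c h ih =>
      rw [List.foldl_cons]
      by_cases hc : c.1 = "Ace"
      · have hstep : stepA ts c = ts.flatMap aceExp := by
          rw [show stepA ts c = ts.foldl (fun nt t => nt ++ [t + 1] ++ [t + 11]) [] by
              simp [stepA, hc],
            foldl_aceExp, List.nil_append]
        rw [hstep, ih, List.flatMap_assoc]
        have hf1 : List.filter (fun c => decide (c.1 = "Ace")) (c :: h)
            = c :: List.filter (fun c => decide (c.1 = "Ace")) h := by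
          simp [hc]
        have hf2 : List.filter (fun c => decide ¬c.1 = "Ace") (c :: h)
            = List.filter (fun c => decide ¬c.1 = "Ace") h := by
          simp [hc]
        rw [hf1, hf2, List.length_cons]
        congr 1
        funext d
        rw [combosOf_succ_head]
        simp only [aceExp, List.flatMap_cons, List.flatMap_nil, List.append_nil,
          List.map_append, List.map_map]
        congr 1 <;> exact List.map_congr_left (fun t _ => by simp only [Function.comp]; ring)
      · have hstep : stepA ts c = ts.map (fun t => t + get_card_value c) := by
          simp [stepA, hc]
        rw [hstep, ih, List.flatMap_map]
        have hf1 : List.filter (fun c => decide (c.1 = "Ace")) (c :: h)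
            = List.filter (fun c => decide (c.1 = "Ace")) h := by
          simp [hc]
        have hf2 : List.filter (fun c => decide ¬c.1 = "Ace") (c :: h)
            = c :: List.filter (fun c => decide ¬c.1 = "Ace") h := by
          simp [hc]
        rw [hf1, hf2]
        congr 1
        funext d
        rw [List.foldl_cons, PySem.List.foldl_add, PySem.List.foldl_add]
        exact List.map_congr_left (fun t _ => by ring)

-- ===== VERDICT (by name: the statement is the Claim_ definition above) =====
theorem possible_totals_spec : Claim_equal_possible_totals := by
  intro hand _ _
  unfold Spec_possible_totals
  rw [possible_totals_eq_foldl, main_inv, alt_eq]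
  simp only [List.flatMap_cons, List.flatMap_nil, List.append_nil]
  exact List.map_congr_left (fun t _ => by ring)
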